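-- pv_equiv track=rewrite | github.com/yyb1012/eLicense | src/ops/inspection/alert_dispatcher.py | _severity_from_rules
-- ===== SOURCE A (Python) =====
-- def _severity_from_rules(triggered_rules: list[str]) -> str:
--     """根据触发规则判定告警等级，便于值班快速分流处理优先级。"""
--     if any(rule in {"writeback_failure_rate", "compensation_trigger_count"} for rule in triggered_rules):
--         return "critical"
--     if any(rule in {"request_error_rate", "latency_p99_ms"} for rule in triggered_rules):
--         return "high"
--     if len(triggered_rules) >= 3:
--         return "high"
--     return "medium"
-- ===== SOURCE B (Python) =====
-- _RANK = {
--     "writeback_failure_rate": 2,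
--     "compensation_trigger_count": 2,
--     "request_error_rate": 1,
--     "latency_p99_ms": 1,
-- }
--
--
-- def _severity_from_rules(triggered_rules: list[str]) -> str:
--     m = 0
--     for rule in triggered_rules:
--         m = max(m, _RANK.get(rule, 0))
--     if m == 2:
--         return "critical"
--     if m == 1 or len(triggered_rules) >= 3:
--         return "high"
--     return "medium"
-- ===== Notes on version B (the rewrite author's own statement) =====
-- stated objective: idiomatic
-- what changed: Replaced the two short-circuit any-scans and the separate length fallback with a single reduction computing the maximum severity rank from a rule->rank table, followed by one rank-based dispatch.
import Mathlib
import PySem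

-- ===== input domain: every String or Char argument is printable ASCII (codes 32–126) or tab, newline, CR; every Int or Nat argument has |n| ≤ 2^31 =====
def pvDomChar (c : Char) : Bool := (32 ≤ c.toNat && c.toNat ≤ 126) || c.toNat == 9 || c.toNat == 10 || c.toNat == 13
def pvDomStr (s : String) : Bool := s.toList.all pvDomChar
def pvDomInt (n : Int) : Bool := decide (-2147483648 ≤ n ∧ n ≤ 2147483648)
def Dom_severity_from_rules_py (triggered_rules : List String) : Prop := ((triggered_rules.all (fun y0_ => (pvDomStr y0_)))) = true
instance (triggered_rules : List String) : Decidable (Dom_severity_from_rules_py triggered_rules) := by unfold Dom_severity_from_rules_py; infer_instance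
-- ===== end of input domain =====

-- B replaces the two any-scans with one max-rank reduction over a rule->rank table (idiomatic; same cost).
-- ===== PORT A =====
def severity_from_rules_py (triggered_rules : List String) : String :=
  if triggered_rules.any (fun rule => rule == "writeback_failure_rate" || rule == "compensation_trigger_count") then "critical"
  else if triggered_rules.any (fun rule => rule == "request_error_rate" || rule == "latency_p99_ms") then "high"
  else if triggered_rules.length ≥ 3 then "high"
  else "medium"

-- ===== PORT B =====
-- B: one reduction over a rule->rank table, then rank-based dispatch (idiomatic; same cost).
def pvRank (rule : String) : Nat :=
  (PySem.Dict.getD (PySem.Dict.ofList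
    [("writeback_failure_rate", 2), ("compensation_trigger_count", 2),
     ("request_error_rate", 1), ("latency_p99_ms", 1)]) rule 0)

def severity_from_rules_py_alt (triggered_rules : List String) : String :=
  let m := triggered_rules.foldl (fun m rule => max m (pvRank rule)) 0
  if m == 2 then "critical"
  else if m == 1 || triggered_rules.length ≥ 3 then "high"
  else "medium"

-- ===== PRECONDITION & SPEC =====
def Spec_severity_from_rules_py (triggered_rules : List String) (out : String) : Prop := out = severity_from_rules_py_alt triggered_rules
instance (triggered_rules : List String) (out : String) : Decidable (Spec_severity_from_rules_py triggered_rules out) := by unfold Spec_severity_from_rules_py; infer_instance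

-- ===== CLAIM (what is proved, stated in full; the proofs are below) =====
def Claim_equal_severity_from_rules_py : Prop := ∀ (triggered_rules : List String), Dom_severity_from_rules_py triggered_rules → Spec_severity_from_rules_py triggered_rules (severity_from_rules_py triggered_rules)

-- ===== LEMMAS AND PROOFS =====

-- ===== VERDICT (by name: the statement is the Claim_ definition above) =====
lemma pvRank_eq (r : String) :
    pvRank r = (if r = "writeback_failure_rate" then 2 else if r = "compensation_trigger_count" then 2
                else if r = "request_error_rate" then 1 else if r = "latency_p99_ms" then 1 else 0) := by
  have h : PySem.Dict.ofList
      [("writeback_failure_rate", (2 : Nat)), ("compensation_trigger_count", 2),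
       ("request_error_rate", 1), ("latency_p99_ms", 1)] =
      PySem.Dict.mk
      [("writeback_failure_rate", 2), ("compensation_trigger_count", 2),
       ("request_error_rate", 1), ("latency_p99_ms", 1)] := by decide
  rw [pvRank, PySem.Dict.getD, h]
  rw [PySem.Dict.get?_mk_cons, PySem.Dict.get?_mk_cons, PySem.Dict.get?_mk_cons, PySem.Dict.get?_mk_cons]
  simp only [beq_iff_eq]
  split_ifs with a b c d <;> first | rfl | (exact absurd a.symm ‹_›) | (exact absurd b.symm ‹_›) | (exact absurd c.symm ‹_›) | (exact absurd d.symm ‹_›) | skip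
  all_goals simp_all

lemma pv_fold_char (ts : List String) (a : Nat) :
    ts.foldl (fun m rule => max m (pvRank rule)) a =
      max a (if ts.any (fun r => r == "writeback_failure_rate" || r == "compensation_trigger_count") then 2
             else if ts.any (fun r => r == "request_error_rate" || r == "latency_p99_ms") then 1
             else 0) := by
  induction ts generalizing a with
  | nil => simp
  | cons h t ih =>
    rw [List.foldl_cons, ih, pvRank_eq]
    simp only [List.any_cons]
    by_cases tc : (t.any fun r => r == "writeback_failure_rate" || r == "compensation_trigger_count") = true <;>
      by_cases th : (t.any fun r => r == "request_error_rate" || r == "latency_p99_ms") = true <;>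
        by_cases h1 : h = "writeback_failure_rate" <;>
          by_cases h2 : h = "compensation_trigger_count" <;>
            by_cases h3 : h = "request_error_rate" <;>
              by_cases h4 : h = "latency_p99_ms" <;>
                simp [h1, h2, h3, h4, tc, th]

theorem severity_from_rules_py_spec : Claim_equal_severity_from_rules_py := by
  intro ts _
  unfold Spec_severity_from_rules_py severity_from_rules_py severity_from_rules_py_alt
  simp only [pv_fold_char]
  by_cases hc : ts.any (fun r => r == "writeback_failure_rate" || r == "compensation_trigger_count") <;>
    by_cases hh : ts.any (fun r => r == "request_error_rate" || r == "latency_p99_ms") <;>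
      by_cases hl : ts.length ≥ 3 <;>
        simp [hc, hh, hl]
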